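-- pv_equiv track=rewrite | github.com/dolly0920/algorithm-problem | programmers/python/221030/programmers92344-2.py | solution
-- ===== SOURCE A (Python) =====
-- def solution(board, skill):
--     answer = 0
--
--     tmp = [[0]*(len(board[0])+1) for _ in range (len(board)+1)]
--     for type, r1, c1, r2, c2, degree in skill :
--         tmp[r1][c1] += degree if type == 2 else -degree
--         tmp[r1][c2+1] -= degree if type == 2 else -degree
--         tmp[r2+1][c1] -= degree if type == 2 else -degree
--         tmp[r2+1][c2+1] += degree if type == 2 else -degree
--
--     ## 행 기준 누적합
--     for i in range (len(tmp)-1) :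
--         for j in range (len(tmp[0]) - 1) :
--             tmp[i][j+1] += tmp[i][j]
--     ## 열 기준 누적합
--     for i in range (len(tmp[0])-1) :
--         for j in range (len(tmp) - 1) :
--             tmp[j+1][i] += tmp[j][i]
--
--     ## board 연산
--     for i in range (len(board)) :
--         for j in range (len(board[0])) :
--             if board[i][j] + tmp[i][j] >= 1 :
--                 answer += 1
--
--     return answer
-- ===== SOURCE B (Python) =====
-- def solution(board, skill):
--     answer = 0
--     m = len(board[0])
--     for i in range(len(board)):
--         for j in range(m):
--             h = board[i][j]
--             for t, r1, c1, r2, c2, d in skill: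
--                 if r1 <= i <= r2 and c1 <= j <= c2:
--                     h += d if t == 2 else -d
--             if h >= 1:
--                 answer += 1
--     return answer
-- ===== Notes on version B (the rewrite author's own statement) =====
-- stated objective: simpler
-- what changed: Replaces the (R+1)x(C+1) difference table with two prefix-sum sweeps by a direct per-cell scan that adds each skill's degree exactly where its rectangle covers the cell.
-- outside the precondition, e.g. on solution([[-5], [5]], [[2, -1, 0, -1, 0, 10]]): A returns 0, B returns 1; on solution([[1], [1], [10]], [[2, 2, 0, 0, 0, 5]]): A returns 2, B returns 3
import Mathlib
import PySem

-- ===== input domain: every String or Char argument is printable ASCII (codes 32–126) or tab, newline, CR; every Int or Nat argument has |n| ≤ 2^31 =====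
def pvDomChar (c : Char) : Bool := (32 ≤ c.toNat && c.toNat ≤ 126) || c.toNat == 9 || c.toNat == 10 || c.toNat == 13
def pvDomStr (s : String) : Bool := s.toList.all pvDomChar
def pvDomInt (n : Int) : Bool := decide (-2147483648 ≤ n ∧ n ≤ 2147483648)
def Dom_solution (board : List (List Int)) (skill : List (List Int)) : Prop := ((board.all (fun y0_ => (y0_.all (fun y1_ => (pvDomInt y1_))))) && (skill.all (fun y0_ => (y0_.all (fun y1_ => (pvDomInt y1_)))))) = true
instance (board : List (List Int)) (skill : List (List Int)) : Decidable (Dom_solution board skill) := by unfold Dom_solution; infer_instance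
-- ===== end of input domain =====

-- B replaces A's difference table + two prefix-sum sweeps by a direct per-cell scan over the skills (simpler, not faster).

-- ===== PORT A =====
-- tmp[i][j] += v with Python Int indices (pySetD/pyGetD are exact on the in-range indices Pre_ admits)
def pvBump (g : List (List Int)) (i j v : Int) : List (List Int) :=
  PySem.List.pySetD g i
    (PySem.List.pySetD (PySem.List.pyGetD g i []) j
      (PySem.List.pyGetD (PySem.List.pyGetD g i []) j 0 + v))

-- the four corner updates of one skill
def pvApplySkill (g : List (List Int)) (s : List Int) : List (List Int) :=
  let r1 := s.getD 1 0
  let c1 := s.getD 2 0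
  let r2 := s.getD 3 0
  let c2 := s.getD 4 0
  let v : Int := if s.getD 0 0 == 2 then s.getD 5 0 else -(s.getD 5 0)
  pvBump (pvBump (pvBump (pvBump g r1 c1 v) r1 (c2 + 1) (-v)) (r2 + 1) c1 (-v)) (r2 + 1) (c2 + 1) v

-- one row of the row-wise prefix sums: for j in range(len(tmp[0])-1): tmp[i][j+1] += tmp[i][j]
def pvRowStep (h : List (List Int)) (i : Nat) : List (List Int) :=
  (List.range ((h.getD 0 []).length - 1)).foldl (fun h2 j =>
    h2.set i ((h2.getD i []).set (j + 1) ((h2.getD i []).getD (j + 1) 0 + (h2.getD i []).getD j 0))) h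

-- for i in range(len(tmp)-1): <row step>
def pvRowPass (g : List (List Int)) : List (List Int) :=
  (List.range (g.length - 1)).foldl pvRowStep g

-- one column of the column-wise prefix sums: for j in range(len(tmp)-1): tmp[j+1][i] += tmp[j][i]
def pvColStep (h : List (List Int)) (c : Nat) : List (List Int) :=
  (List.range (h.length - 1)).foldl (fun h2 j =>
    h2.set (j + 1) ((h2.getD (j + 1) []).set c ((h2.getD (j + 1) []).getD c 0 + (h2.getD j []).getD c 0))) h

-- for i in range(len(tmp[0])-1): <column step>
def pvColPass (g : List (List Int)) : List (List Int) :=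
  (List.range ((g.getD 0 []).length - 1)).foldl pvColStep g

def solution (board : List (List Int)) (skill : List (List Int)) : Int :=
  let tmp0 := List.replicate (board.length + 1) (List.replicate ((board.getD 0 []).length + 1) (0 : Int))
  let t := pvColPass (pvRowPass (skill.foldl pvApplySkill tmp0))
  (List.range board.length).foldl (fun ans i =>
    (List.range ((board.getD 0 []).length)).foldl (fun ans2 j =>
      if (board.getD i []).getD j 0 + (t.getD i []).getD j 0 ≥ 1 then ans2 + 1 else ans2) ans) 0

-- ===== PORT B =====
def solution_alt (board : List (List Int)) (skill : List (List Int)) : Int :=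
  let m := (board.getD 0 []).length
  (List.range board.length).foldl (fun ans (i : Nat) =>
    (List.range m).foldl (fun ans2 (j : Nat) =>
      let h := skill.foldl (fun h s =>
        if s.getD 1 0 ≤ (i : Int) ∧ (i : Int) ≤ s.getD 3 0 ∧
           s.getD 2 0 ≤ (j : Int) ∧ (j : Int) ≤ s.getD 4 0
        then h + (if s.getD 0 0 == 2 then s.getD 5 0 else -(s.getD 5 0)) else h)
        ((board.getD i []).getD j 0)
      if h ≥ 1 then ans2 + 1 else ans2) ans) 0

-- ===== PRECONDITION & SPEC =====
-- Pre_ restricts to the problem's natural domain: a nonempty board whose rows are at least as long as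
-- board[0], and each skill a 6-tuple whose rectangle lies inside the board; outside it A raises
-- (IndexError / unpacking ValueError) or, for negative or reversed coordinates, returns accidental
-- values produced by Python negative-index wraparound of the difference table.
def Pre_solution (board : List (List Int)) (skill : List (List Int)) : Prop :=
  board ≠ [] ∧ (∀ row ∈ board, (board.getD 0 []).length ≤ row.length) ∧
  ∀ s ∈ skill, s.length = 6 ∧
    0 ≤ s.getD 1 0 ∧ s.getD 1 0 ≤ s.getD 3 0 ∧ s.getD 3 0 < (board.length : Int) ∧
    0 ≤ s.getD 2 0 ∧ s.getD 2 0 ≤ s.getD 4 0 ∧ s.getD 4 0 < ((board.getD 0 []).length : Int)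
instance (board : List (List Int)) (skill : List (List Int)) : Decidable (Pre_solution board skill) := by
  unfold Pre_solution; infer_instance

def pvWitness_solution : List (List Int) × List (List Int) :=
  ([[1, 2], [3, 4]], [[2, 0, 0, 1, 1, 3], [1, 0, 1, 1, 1, 5]])

def Spec_solution (board : List (List Int)) (skill : List (List Int)) (out : Int) : Prop := out = solution_alt board skill
instance (board : List (List Int)) (skill : List (List Int)) (out : Int) : Decidable (Spec_solution board skill out) := by unfold Spec_solution; infer_instance

-- ===== CLAIM (what is proved, stated in full; the proofs are below) =====
def Claim_equal_solution : Prop := ∀ (board : List (List Int)) (skill : List (List Int)), Dom_solution board skill → Pre_solution board skill → Spec_solution board skill (solution board skill)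

-- ===== LEMMAS AND PROOFS =====

-- grid read, Nat indices, default 0
def pvG (g : List (List Int)) (i j : Nat) : Int := (g.getD i []).getD j 0

-- every row has length m
def pvRect (g : List (List Int)) (m : Nat) : Prop := ∀ r ∈ g, r.length = m

-- value of one skill: degree if type == 2 else -degree
def pvV (s : List Int) : Int := if s.getD 0 0 == 2 then s.getD 5 0 else -(s.getD 5 0)

-- row / column factors of the four-corner difference stamp
def pvRho (s : List Int) (i : Nat) : Int :=
  (if (i : Int) = s.getD 1 0 then 1 else 0) - (if (i : Int) = s.getD 3 0 + 1 then 1 else 0)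
def pvGam (s : List Int) (j : Nat) : Int :=
  (if (j : Int) = s.getD 2 0 then 1 else 0) - (if (j : Int) = s.getD 4 0 + 1 then 1 else 0)

-- the per-skill side conditions Pre_ grants, relative to grid sizes n, m
def pvOk (n m : Nat) (s : List Int) : Prop :=
  0 ≤ s.getD 1 0 ∧ s.getD 1 0 ≤ s.getD 3 0 ∧ s.getD 3 0 < (n : Int) ∧
  0 ≤ s.getD 2 0 ∧ s.getD 2 0 ≤ s.getD 4 0 ∧ s.getD 4 0 < (m : Int)

lemma pvGetD_set {α : Type} (l : List α) (a j : Nat) (x d : α) :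
    (l.set a x).getD j d = if j = a ∧ a < l.length then x else l.getD j d := by
  simp [List.getD_eq_getElem?_getD, List.getElem?_set]
  split_ifs <;> simp_all

lemma pvRect_getD {g : List (List Int)} {m : Nat} (h : pvRect g m) {i : Nat} (hi : i < g.length) :
    (g.getD i []).length = m := by
  rw [List.getD_eq_getElem _ _ hi]
  exact h _ (List.getElem_mem hi)

lemma pvRect_set {g : List (List Int)} {m : Nat} (h : pvRect g m) (a b : Nat) (x : Int) :
    pvRect (g.set a ((g.getD a []).set b x)) m := by
  by_cases ha : a < g.length
  · intro r hr
    rcases List.mem_or_eq_of_mem_set hr with hr' | rfl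
    · exact h r hr'
    · rw [List.length_set]; exact pvRect_getD h ha
  · rw [List.set_eq_of_length_le (by omega)]; exact h

lemma pvG_setEntry {g : List (List Int)} {m : Nat} (hR : pvRect g (m + 1)) {a b : Nat}
    (ha : a < g.length) (hb : b ≤ m) (x : Int) (i j : Nat) :
    pvG (g.set a ((g.getD a []).set b x)) i j = if i = a ∧ j = b then x else pvG g i j := by
  unfold pvG
  rw [pvGetD_set]
  by_cases hia : i = a
  · subst hia
    rw [if_pos ⟨rfl, ha⟩, pvGetD_set, pvRect_getD hR ha]
    simp [Nat.lt_succ_iff.mpr hb]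
  · simp [hia]

lemma pvBump_eq {g : List (List Int)} {a b : Int} (ha : 0 ≤ a) (hb : 0 ≤ b) (v : Int) :
    pvBump g a b v =
      g.set a.toNat ((g.getD a.toNat []).set b.toNat ((g.getD a.toNat []).getD b.toNat 0 + v)) := by
  unfold pvBump
  rw [PySem.List.pySetD_of_nonneg _ _ ha, PySem.List.pyGetD_of_nonneg _ _ ha,
      PySem.List.pySetD_of_nonneg _ _ hb, PySem.List.pyGetD_of_nonneg _ _ hb]

lemma pvBump_length {g : List (List Int)} {a b : Int} (ha : 0 ≤ a) (hb : 0 ≤ b) (v : Int) :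
    (pvBump g a b v).length = g.length := by
  rw [pvBump_eq ha hb]; simp

lemma pvBump_rect {g : List (List Int)} {m : Nat} (hR : pvRect g m) {a b : Int}
    (ha : 0 ≤ a) (hb : 0 ≤ b) (v : Int) : pvRect (pvBump g a b v) m := by
  rw [pvBump_eq ha hb]; exact pvRect_set hR _ _ _

lemma pvG_bump {g : List (List Int)} {m : Nat} (hR : pvRect g (m + 1)) {a b : Int}
    (ha0 : 0 ≤ a) (ha : a < (g.length : Int)) (hb0 : 0 ≤ b) (hb : b ≤ (m : Int)) (v : Int)
    (i j : Nat) :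
    pvG (pvBump g a b v) i j = pvG g i j + (if (i : Int) = a ∧ (j : Int) = b then v else 0) := by
  rw [pvBump_eq ha0 hb0,
      pvG_setEntry hR (by omega) (by omega) _ i j]
  by_cases hc : (i : Int) = a ∧ (j : Int) = b
  · have hi : i = a.toNat := by omega
    have hj : j = b.toNat := by omega
    subst hi; subst hj
    simp [hc, pvG]
  · have : ¬(i = a.toNat ∧ j = b.toNat) := by omega
    simp [this, hc]

lemma pvApplySkill_length {g : List (List Int)} {s : List Int} {n m : Nat} (hok : pvOk n m s) :
    (pvApplySkill g s).length = g.length := by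
  obtain ⟨h1, h2, h3, h4, h5, h6⟩ := hok
  unfold pvApplySkill
  rw [pvBump_length (by omega) (by omega), pvBump_length (by omega) (by omega),
      pvBump_length (by omega) (by omega), pvBump_length (by omega) (by omega)]

lemma pvApplySkill_rect {g : List (List Int)} {s : List Int} {n m : Nat} {mr : Nat}
    (hR : pvRect g mr) (hok : pvOk n m s) : pvRect (pvApplySkill g s) mr := by
  obtain ⟨h1, h2, h3, h4, h5, h6⟩ := hok
  unfold pvApplySkill
  exact pvBump_rect (pvBump_rect (pvBump_rect (pvBump_rect hR (by omega) (by omega) _)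
    (by omega) (by omega) _) (by omega) (by omega) _) (by omega) (by omega) _

lemma pvIteAndMul (P Q : Prop) [Decidable P] [Decidable Q] (w : Int) :
    (if P ∧ Q then w else 0) = (if P then (1 : Int) else 0) * ((if Q then (1 : Int) else 0) * w) := by
  by_cases hP : P <;> by_cases hQ : Q <;> simp [hP, hQ]

lemma pvG_applySkill {g : List (List Int)} {n m : Nat} (hL : g.length = n + 1)
    (hR : pvRect g (m + 1)) {s : List Int} (hok : pvOk n m s) (i j : Nat) :
    pvG (pvApplySkill g s) i j = pvG g i j + pvV s * (pvRho s i * pvGam s j) := by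
  obtain ⟨h1, h2, h3, h4, h5, h6⟩ := hok
  simp only [pvApplySkill]
  set v : Int := if s.getD 0 0 == 2 then s.getD 5 0 else -(s.getD 5 0) with hv
  set g1 := pvBump g (s.getD 1 0) (s.getD 2 0) v with hg1
  set g2 := pvBump g1 (s.getD 1 0) (s.getD 4 0 + 1) (-v) with hg2
  set g3 := pvBump g2 (s.getD 3 0 + 1) (s.getD 2 0) (-v) with hg3
  have hR1 : pvRect g1 (m + 1) := pvBump_rect hR (by omega) (by omega) _
  have hL1 : g1.length = g.length := pvBump_length (by omega) (by omega) _
  have hR2 : pvRect g2 (m + 1) := pvBump_rect hR1 (by omega) (by omega) _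
  have hL2 : g2.length = g.length := by
    rw [hg2, pvBump_length (by omega) (by omega)]; exact hL1
  have hR3 : pvRect g3 (m + 1) := pvBump_rect hR2 (by omega) (by omega) _
  have hL3 : g3.length = g.length := by
    rw [hg3, pvBump_length (by omega) (by omega)]; exact hL2
  rw [pvG_bump (m := m) hR3 (by omega) (by rw [hL3, hL]; push_cast; omega) (by omega)
        (by omega) v i j,
      pvG_bump (m := m) hR2 (by omega) (by rw [hL2, hL]; push_cast; omega) (by omega)
        (by omega) (-v) i j,
      pvG_bump (m := m) hR1 (by omega) (by rw [hL1, hL]; push_cast; omega) (by omega)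
        (by omega) (-v) i j,
      pvG_bump (m := m) hR (by omega) (by rw [hL]; push_cast; omega) (by omega)
        (by omega) v i j]
  simp only [pvIteAndMul]
  unfold pvV pvRho pvGam
  rw [← hv]
  ring

lemma pvFoldSkills_length {n m : Nat} (skill : List (List Int)) :
    ∀ {g : List (List Int)}, (∀ s ∈ skill, pvOk n m s) →
      (skill.foldl pvApplySkill g).length = g.length := by
  induction skill with
  | nil => intro g _; rfl
  | cons s rest ih =>
    intro g hok
    simp only [List.foldl_cons]
    rw [ih (fun t ht => hok t (by simp [ht])), pvApplySkill_length (hok s (by simp))]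

lemma pvFoldSkills_rect {n m mr : Nat} (skill : List (List Int)) :
    ∀ {g : List (List Int)}, pvRect g mr → (∀ s ∈ skill, pvOk n m s) →
      pvRect (skill.foldl pvApplySkill g) mr := by
  induction skill with
  | nil => intro g hR _; exact hR
  | cons s rest ih =>
    intro g hR hok
    simp only [List.foldl_cons]
    exact ih (pvApplySkill_rect hR (hok s (by simp))) (fun t ht => hok t (by simp [ht]))

lemma pvFoldSkills {n m : Nat} (skill : List (List Int)) :
    ∀ {g : List (List Int)}, g.length = n + 1 → pvRect g (m + 1) →
      (∀ s ∈ skill, pvOk n m s) → ∀ i j,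
      pvG (skill.foldl pvApplySkill g) i j
        = pvG g i j + (skill.map (fun s => pvV s * (pvRho s i * pvGam s j))).sum := by
  induction skill with
  | nil => intro g _ _ _ i j; simp
  | cons s rest ih =>
    intro g hL hR hok i j
    simp only [List.foldl_cons, List.map_cons, List.sum_cons]
    rw [ih (by rw [pvApplySkill_length (hok s (by simp))]; exact hL)
          (pvApplySkill_rect hR (hok s (by simp)))
          (fun t ht => hok t (by simp [ht])) i j,
        pvG_applySkill hL hR (hok s (by simp)) i j]
    ring

lemma pvG_replicate (a b i j : Nat) :
    pvG (List.replicate a (List.replicate b (0 : Int))) i j = 0 := by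
  unfold pvG
  simp [List.getD_eq_getElem?_getD, List.getElem?_replicate]
  split_ifs <;> simp [List.getElem?_replicate] <;> split_ifs <;> simp

-- the inner-loop bodies of the two passes, named for the proofs
def pvRStep (i : Nat) (h2 : List (List Int)) (j : Nat) : List (List Int) :=
  h2.set i ((h2.getD i []).set (j + 1) ((h2.getD i []).getD (j + 1) 0 + (h2.getD i []).getD j 0))

def pvCStep (c : Nat) (h2 : List (List Int)) (j : Nat) : List (List Int) :=
  h2.set (j + 1) ((h2.getD (j + 1) []).set c ((h2.getD (j + 1) []).getD c 0 + (h2.getD j []).getD c 0))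

lemma pvRowStep_eq (h : List (List Int)) (i : Nat) :
    pvRowStep h i = (List.range ((h.getD 0 []).length - 1)).foldl (pvRStep i) h := rfl

lemma pvColStep_eq (h : List (List Int)) (c : Nat) :
    pvColStep h c = (List.range (h.length - 1)).foldl (pvCStep c) h := rfl

-- row inner loop: after the updates at positions 1..w, row i holds prefix sums up to position w
lemma pvRowInner {m : Nat} (i : Nat) (w : Nat) {h : List (List Int)}
    (hR : pvRect h (m + 1)) (hi : i < h.length) (hw : w ≤ m) :
    (∀ i' j, pvG ((List.range w).foldl (pvRStep i) h) i' j
        = if i' = i ∧ j ≤ w then ∑ x ∈ Finset.range (j + 1), pvG h i x else pvG h i' j)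
      ∧ ((List.range w).foldl (pvRStep i) h).length = h.length
      ∧ pvRect ((List.range w).foldl (pvRStep i) h) (m + 1) := by
  induction w with
  | zero =>
    refine ⟨fun i' j => ?_, rfl, hR⟩
    simp only [List.range_zero, List.foldl_nil]
    split_ifs with hc
    · obtain ⟨rfl, hj⟩ := hc
      interval_cases j
      simp
    · rfl
  | succ w ih =>
    obtain ⟨IH, IHlen, IHrect⟩ := ih (by omega)
    rw [List.range_succ, List.foldl_append, List.foldl_cons, List.foldl_nil]
    set H := (List.range w).foldl (pvRStep i) h with hH
    have hstep : ∀ i' j, pvG (pvRStep i H w) i' j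
        = if i' = i ∧ j = w + 1 then pvG H i (w + 1) + pvG H i w else pvG H i' j := by
      intro i' j
      unfold pvRStep
      exact pvG_setEntry IHrect (by omega) (by omega) _ i' j
    refine ⟨fun i' j => ?_, by unfold pvRStep; rw [List.length_set, IHlen],
      by unfold pvRStep; exact pvRect_set IHrect _ _ _⟩
    rw [hstep]
    by_cases hc1 : i' = i ∧ j = w + 1
    · obtain ⟨rfl, rfl⟩ := hc1
      rw [if_pos ⟨rfl, rfl⟩, IH, IH]
      split_ifs <;> first | (exfalso; omega) | (simp only [Finset.sum_range_succ]; ring)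
    · rw [if_neg hc1, IH i' j]
      by_cases hc2 : i' = i ∧ j ≤ w
      · rw [if_pos hc2, if_pos ⟨hc2.1, by omega⟩]
      · rw [if_neg hc2, if_neg (by omega)]

-- column inner loop: after the updates at rows 1..w, column c holds prefix sums down to row w
lemma pvColInner {m : Nat} (c : Nat) (w : Nat) {h : List (List Int)}
    (hR : pvRect h (m + 1)) (hc : c ≤ m) (hw : w ≤ h.length - 1) (hne : h ≠ []) :
    (∀ i j, pvG ((List.range w).foldl (pvCStep c) h) i j
        = if j = c ∧ i ≤ w then ∑ x ∈ Finset.range (i + 1), pvG h x c else pvG h i j)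
      ∧ ((List.range w).foldl (pvCStep c) h).length = h.length
      ∧ pvRect ((List.range w).foldl (pvCStep c) h) (m + 1) := by
  induction w with
  | zero =>
    refine ⟨fun i j => ?_, rfl, hR⟩
    simp only [List.range_zero, List.foldl_nil]
    split_ifs with hcc
    · obtain ⟨rfl, hj⟩ := hcc
      interval_cases i
      simp
    · rfl
  | succ w ih =>
    obtain ⟨IH, IHlen, IHrect⟩ := ih (by omega)
    rw [List.range_succ, List.foldl_append, List.foldl_cons, List.foldl_nil]
    set H := (List.range w).foldl (pvCStep c) h with hH
    have hlen0 : 0 < h.length := List.length_pos_iff.mpr hne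
    have hstep : ∀ i j, pvG (pvCStep c H w) i j
        = if i = w + 1 ∧ j = c then pvG H (w + 1) c + pvG H w c else pvG H i j := by
      intro i j
      unfold pvCStep
      exact pvG_setEntry IHrect (by omega) (by omega) _ i j
    refine ⟨fun i j => ?_, by unfold pvCStep; rw [List.length_set, IHlen],
      by unfold pvCStep; exact pvRect_set IHrect _ _ _⟩
    rw [hstep]
    by_cases hc1 : i = w + 1 ∧ j = c
    · obtain ⟨rfl, rfl⟩ := hc1
      rw [if_pos ⟨rfl, rfl⟩, IH, IH]
      split_ifs <;> first | (exfalso; omega) | (simp only [Finset.sum_range_succ]; ring)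
    · rw [if_neg hc1, IH i j]
      by_cases hc2 : j = c ∧ i ≤ w
      · rw [if_pos hc2, if_pos ⟨hc2.1, by omega⟩]
      · rw [if_neg hc2, if_neg (by omega)]

-- outer row loop
lemma pvRowOuter {m : Nat} (w : Nat) {g : List (List Int)}
    (hR : pvRect g (m + 1)) (hne : g ≠ []) (hw : w ≤ g.length - 1) :
    (∀ i j, pvG ((List.range w).foldl pvRowStep g) i j
        = if i < w ∧ j ≤ m then ∑ x ∈ Finset.range (j + 1), pvG g i x else pvG g i j)
      ∧ ((List.range w).foldl pvRowStep g).length = g.length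
      ∧ pvRect ((List.range w).foldl pvRowStep g) (m + 1) := by
  induction w with
  | zero =>
    refine ⟨fun i j => ?_, rfl, hR⟩
    simp
  | succ w ih =>
    obtain ⟨IH, IHlen, IHrect⟩ := ih (by omega)
    rw [List.range_succ, List.foldl_append, List.foldl_cons, List.foldl_nil]
    set H := (List.range w).foldl pvRowStep g with hH
    have hlen0 : 0 < g.length := List.length_pos_iff.mpr hne
    have hHne : H ≠ [] := by
      intro hcon; rw [hcon] at IHlen; simp at IHlen; omega
    have hm : (H.getD 0 []).length = m + 1 := pvRect_getD IHrect (by omega)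
    have hstep := pvRowInner (m := m) w m IHrect (by omega) (le_refl m)
    obtain ⟨S, Slen, Srect⟩ := hstep
    rw [pvRowStep_eq, hm]
    simp only [Nat.add_sub_cancel]
    refine ⟨fun i j => ?_, by rw [Slen, IHlen], Srect⟩
    rw [S i j]
    by_cases hc1 : i = w ∧ j ≤ m
    · obtain ⟨rfl, hj⟩ := hc1
      rw [if_pos ⟨rfl, hj⟩, if_pos ⟨by omega, hj⟩]
      refine Finset.sum_congr rfl (fun x hx => ?_)
      rw [IH, if_neg (by omega)]
    · rw [if_neg hc1, IH i j]
      by_cases hc2 : i < w ∧ j ≤ m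
      · rw [if_pos hc2, if_pos ⟨by omega, hc2.2⟩]
      · rw [if_neg hc2, if_neg (by omega)]

-- outer column loop
lemma pvColOuter {m : Nat} (w : Nat) {g : List (List Int)}
    (hR : pvRect g (m + 1)) (hne : g ≠ []) (hw : w ≤ m) :
    (∀ i j, pvG ((List.range w).foldl pvColStep g) i j
        = if j < w ∧ i ≤ g.length - 1 then ∑ x ∈ Finset.range (i + 1), pvG g x j else pvG g i j)
      ∧ ((List.range w).foldl pvColStep g).length = g.length
      ∧ pvRect ((List.range w).foldl pvColStep g) (m + 1) := by
  induction w with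
  | zero =>
    refine ⟨fun i j => ?_, rfl, hR⟩
    simp
  | succ w ih =>
    obtain ⟨IH, IHlen, IHrect⟩ := ih (by omega)
    rw [List.range_succ, List.foldl_append, List.foldl_cons, List.foldl_nil]
    set H := (List.range w).foldl pvColStep g with hH
    have hlen0 : 0 < g.length := List.length_pos_iff.mpr hne
    have hHne : H ≠ [] := by
      intro hcon; rw [hcon] at IHlen; simp at IHlen; omega
    have hstep := pvColInner (m := m) w (H.length - 1) IHrect (by omega) (le_refl _) hHne
    obtain ⟨S, Slen, Srect⟩ := hstep
    rw [pvColStep_eq]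
    refine ⟨fun i j => ?_, by rw [Slen, IHlen], Srect⟩
    rw [S i j, IHlen]
    by_cases hc1 : j = w ∧ i ≤ g.length - 1
    · obtain ⟨rfl, hi⟩ := hc1
      rw [if_pos ⟨rfl, hi⟩, if_pos ⟨by omega, hi⟩]
      refine Finset.sum_congr rfl (fun x hx => ?_)
      rw [IH, if_neg (by omega)]
    · rw [if_neg hc1, IH i j]
      by_cases hc2 : j < w ∧ i ≤ g.length - 1
      · rw [if_pos hc2, if_pos ⟨by omega, hc2.2⟩]
      · rw [if_neg hc2, if_neg (by omega)]

lemma pvSwapSum (l : List (List Int)) (k : Nat) (F : Nat → List Int → Int) :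
    ∑ x ∈ Finset.range k, (l.map (F x)).sum = (l.map (fun s => ∑ x ∈ Finset.range k, F x s)).sum := by
  induction l with
  | nil => simp
  | cons s rest ih => simp [Finset.sum_add_distrib, ih]

lemma pvIndSum (k : Nat) {a : Int} (ha : 0 ≤ a) :
    ∑ x ∈ Finset.range k, (if (x : Int) = a then (1 : Int) else 0) = if a < (k : Int) then 1 else 0 := by
  induction k with
  | zero => rw [if_neg (by omega)]; simp
  | succ k ih =>
    rw [Finset.sum_range_succ, ih]
    push_cast
    split_ifs <;> omega

lemma pvRhoSum (s : List Int) (k : Nat) (h1 : 0 ≤ s.getD 1 0) (h3 : 0 ≤ s.getD 3 0) :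
    ∑ x ∈ Finset.range k, pvRho s x
      = (if s.getD 1 0 < (k : Int) then (1 : Int) else 0)
        - (if s.getD 3 0 + 1 < (k : Int) then (1 : Int) else 0) := by
  unfold pvRho
  rw [Finset.sum_sub_distrib, pvIndSum k h1, pvIndSum k (by omega)]

lemma pvGamSum (s : List Int) (k : Nat) (h4 : 0 ≤ s.getD 2 0) (h6 : 0 ≤ s.getD 4 0) :
    ∑ x ∈ Finset.range k, pvGam s x
      = (if s.getD 2 0 < (k : Int) then (1 : Int) else 0)
        - (if s.getD 4 0 + 1 < (k : Int) then (1 : Int) else 0) := by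
  unfold pvGam
  rw [Finset.sum_sub_distrib, pvIndSum k h4, pvIndSum k (by omega)]

lemma pvMulInd (v : Int) (P Q : Prop) [Decidable P] [Decidable Q] :
    v * (if Q then (1 : Int) else 0) * (if P then (1 : Int) else 0) = if P ∧ Q then v else 0 := by
  split_ifs <;> (try (exfalso; tauto)) <;> ring

lemma pvSkillCell {n m : Nat} {s : List Int} (hok : pvOk n m s) (i j : Nat) :
    ∑ x ∈ Finset.range (i + 1), ∑ y ∈ Finset.range (j + 1), pvV s * (pvRho s x * pvGam s y)
      = if s.getD 1 0 ≤ (i : Int) ∧ (i : Int) ≤ s.getD 3 0 ∧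
           s.getD 2 0 ≤ (j : Int) ∧ (j : Int) ≤ s.getD 4 0 then pvV s else 0 := by
  obtain ⟨h1, h2, h3, h4, h5, h6⟩ := hok
  have e1 : ∀ x : Nat, ∑ y ∈ Finset.range (j + 1), pvV s * (pvRho s x * pvGam s y)
      = pvV s * pvRho s x * ∑ y ∈ Finset.range (j + 1), pvGam s y := by
    intro x
    rw [Finset.mul_sum]
    exact Finset.sum_congr rfl (fun y _ => by ring)
  calc ∑ x ∈ Finset.range (i + 1), ∑ y ∈ Finset.range (j + 1), pvV s * (pvRho s x * pvGam s y)
      = ∑ x ∈ Finset.range (i + 1),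
          pvV s * pvRho s x * ∑ y ∈ Finset.range (j + 1), pvGam s y :=
        Finset.sum_congr rfl (fun x _ => e1 x)
    _ = (pvV s * ∑ y ∈ Finset.range (j + 1), pvGam s y) * ∑ x ∈ Finset.range (i + 1), pvRho s x := by
        rw [Finset.mul_sum]
        exact Finset.sum_congr rfl (fun x _ => by ring)
    _ = _ := by
        rw [pvRhoSum s (i + 1) h1 (by omega), pvGamSum s (j + 1) h4 (by omega)]
        push_cast
        have hA : (if s.getD 1 0 < (i : Int) + 1 then (1 : Int) else 0)
            - (if s.getD 3 0 + 1 < (i : Int) + 1 then (1 : Int) else 0)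
            = if s.getD 1 0 ≤ (i : Int) ∧ (i : Int) ≤ s.getD 3 0 then 1 else 0 := by
          split_ifs <;> omega
        have hB : (if s.getD 2 0 < (j : Int) + 1 then (1 : Int) else 0)
            - (if s.getD 4 0 + 1 < (j : Int) + 1 then (1 : Int) else 0)
            = if s.getD 2 0 ≤ (j : Int) ∧ (j : Int) ≤ s.getD 4 0 then 1 else 0 := by
          split_ifs <;> omega
        rw [hA, hB]
        have hiff : (s.getD 1 0 ≤ (i : Int) ∧ (i : Int) ≤ s.getD 3 0 ∧
            s.getD 2 0 ≤ (j : Int) ∧ (j : Int) ≤ s.getD 4 0)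
            ↔ ((s.getD 1 0 ≤ (i : Int) ∧ (i : Int) ≤ s.getD 3 0) ∧
               (s.getD 2 0 ≤ (j : Int) ∧ (j : Int) ≤ s.getD 4 0)) := by tauto
        rw [if_congr hiff rfl rfl]
        exact pvMulInd (pvV s) _ _

-- the per-cell value of A's fully prefix-summed difference table
lemma pvAcell {board skill : List (List Int)} (pre : Pre_solution board skill) (i j : Nat)
    (hi : i < board.length) (hj : j < (board.getD 0 []).length) :
    pvG (pvColPass (pvRowPass (skill.foldl pvApplySkill
        (List.replicate (board.length + 1)
          (List.replicate ((board.getD 0 []).length + 1) (0 : Int)))))) i j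
      = (skill.map (fun s =>
          if s.getD 1 0 ≤ (i : Int) ∧ (i : Int) ≤ s.getD 3 0 ∧
             s.getD 2 0 ≤ (j : Int) ∧ (j : Int) ≤ s.getD 4 0 then pvV s else 0)).sum := by
  obtain ⟨hne, hrows, hsk⟩ := pre
  set n := board.length with hn
  set m := (board.getD 0 []).length with hm
  have hok : ∀ s ∈ skill, pvOk n m s := by
    intro s hs
    obtain ⟨_, h⟩ := hsk s hs
    exact h
  set t0 : List (List Int) := List.replicate (n + 1) (List.replicate (m + 1) 0) with ht0
  have hR0 : pvRect t0 (m + 1) := by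
    intro r hr
    rw [List.eq_of_mem_replicate hr]
    simp
  set t1 := skill.foldl pvApplySkill t0 with ht1
  have hL1 : t1.length = n + 1 := by
    rw [ht1, pvFoldSkills_length skill hok, ht0]
    simp
  have hR1 : pvRect t1 (m + 1) := pvFoldSkills_rect skill hR0 hok
  have hG1 : ∀ a b : Nat, pvG t1 a b
      = (skill.map (fun s => pvV s * (pvRho s a * pvGam s b))).sum := by
    intro a b
    rw [ht1, pvFoldSkills skill (by rw [ht0]; simp) hR0 hok a b, ht0, pvG_replicate]
    ring
  have hne1 : t1 ≠ [] := by
    intro hcon; rw [hcon] at hL1; simp at hL1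
  obtain ⟨R2, L2, Rect2⟩ := pvRowOuter (m := m) (t1.length - 1) hR1 hne1 (le_refl _)
  set t2 := (List.range (t1.length - 1)).foldl pvRowStep t1 with ht2
  have ht2' : pvRowPass t1 = t2 := rfl
  have hne2 : t2 ≠ [] := by
    intro hcon; rw [hcon] at L2; simp at L2; omega
  have hm2 : (t2.getD 0 []).length = m + 1 := pvRect_getD Rect2 (by rw [L2]; omega)
  obtain ⟨C3, L3, Rect3⟩ := pvColOuter (m := m) m Rect2 hne2 (le_refl m)
  have ht3' : pvColPass t2 = (List.range m).foldl pvColStep t2 := by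
    unfold pvColPass
    rw [hm2]
    simp
  rw [ht2', ht3', C3 i j]
  rw [if_pos ⟨by omega, by omega⟩]
  calc ∑ x ∈ Finset.range (i + 1), pvG t2 x j
      = ∑ x ∈ Finset.range (i + 1), ∑ y ∈ Finset.range (j + 1), pvG t1 x y := by
        refine Finset.sum_congr rfl (fun x hx => ?_)
        have hx' : x < i + 1 := Finset.mem_range.mp hx
        rw [R2 x j, if_pos ⟨by omega, by omega⟩]
    _ = ∑ x ∈ Finset.range (i + 1), ∑ y ∈ Finset.range (j + 1),
          (skill.map (fun s => pvV s * (pvRho s x * pvGam s y))).sum := by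
        exact Finset.sum_congr rfl (fun x _ => Finset.sum_congr rfl (fun y _ => hG1 x y))
    _ = ∑ x ∈ Finset.range (i + 1),
          (skill.map (fun s => ∑ y ∈ Finset.range (j + 1), pvV s * (pvRho s x * pvGam s y))).sum := by
        exact Finset.sum_congr rfl (fun x _ => pvSwapSum skill (j + 1) _)
    _ = (skill.map (fun s => ∑ x ∈ Finset.range (i + 1),
          ∑ y ∈ Finset.range (j + 1), pvV s * (pvRho s x * pvGam s y))).sum :=
        pvSwapSum skill (i + 1) _
    _ = _ :=
        congrArg List.sum (List.map_congr_left (fun s hs => pvSkillCell (hok s hs) i j))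

-- the per-cell value of B's skill fold
lemma pvBcell (skill : List (List Int)) (i j : Nat) (start : Int) :
    skill.foldl (fun h s =>
      if s.getD 1 0 ≤ (i : Int) ∧ (i : Int) ≤ s.getD 3 0 ∧
         s.getD 2 0 ≤ (j : Int) ∧ (j : Int) ≤ s.getD 4 0
      then h + (if s.getD 0 0 == 2 then s.getD 5 0 else -(s.getD 5 0)) else h) start
      = start + (skill.map (fun s =>
          if s.getD 1 0 ≤ (i : Int) ∧ (i : Int) ≤ s.getD 3 0 ∧
             s.getD 2 0 ≤ (j : Int) ∧ (j : Int) ≤ s.getD 4 0 then pvV s else 0)).sum := by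
  have h1 := PySem.List.foldl_congr_mem (l := skill) (init := start)
    (f := fun (h : Int) s =>
      if s.getD 1 0 ≤ (i : Int) ∧ (i : Int) ≤ s.getD 3 0 ∧
         s.getD 2 0 ≤ (j : Int) ∧ (j : Int) ≤ s.getD 4 0
      then h + (if s.getD 0 0 == 2 then s.getD 5 0 else -(s.getD 5 0)) else h)
    (g := fun (h : Int) s => h + (if s.getD 1 0 ≤ (i : Int) ∧ (i : Int) ≤ s.getD 3 0 ∧
        s.getD 2 0 ≤ (j : Int) ∧ (j : Int) ≤ s.getD 4 0 then pvV s else 0))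
    (fun acc x _ => by unfold pvV; beta_reduce; split_ifs <;> simp)
  rw [h1, PySem.List.foldl_add]

theorem solution_spec : Claim_equal_solution := by
  intro board skill _ pre
  unfold Spec_solution
  have hi0 := pre
  obtain ⟨hne, hrows, hsk⟩ := hi0
  simp only [solution, solution_alt]
  apply PySem.List.foldl_congr_mem
  intro acc i hi
  apply PySem.List.foldl_congr_mem
  intro acc2 j hj
  have hi' : i < board.length := List.mem_range.mp hi
  have hj' : j < (board.getD 0 []).length := List.mem_range.mp hj
  have hA := pvAcell pre i j hi' hj'
  rw [pvBcell skill i j ((board.getD i []).getD j 0),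
      show ((pvColPass (pvRowPass (skill.foldl pvApplySkill
        (List.replicate (board.length + 1)
          (List.replicate ((board.getD 0 []).length + 1) (0 : Int)))))).getD i []).getD j 0
        = pvG (pvColPass (pvRowPass (skill.foldl pvApplySkill
            (List.replicate (board.length + 1)
              (List.replicate ((board.getD 0 []).length + 1) (0 : Int)))))) i j from rfl,
      hA]
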